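-- pv_equiv track=rewrite | github.com/spiiin/mp3_srt_pdf_highlight_subtitles | util_scripts/srt_maker.py | flat_to_tk_index
-- ===== SOURCE A (Python) =====
-- def flat_to_tk_index(text, char_index):
--     """Convert a flat character index to a Tkinter text index (line.char)."""
--     current_char_count = 0
--     for line_num, line in enumerate(text.split("\n"), start=1):
--         line_length = len(line) + 1  # +1 for the newline character
--         if current_char_count + line_length > char_index:
--             char_in_line = char_index - current_char_count
--             return f"{line_num}.{char_in_line}"
--         current_char_count += line_length
--     return f"end"
-- ===== SOURCE B (Python) =====
-- def flat_to_tk_index(text, char_index):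
--     """Convert a flat character index to a Tkinter text index (line.char)."""
--     if char_index > len(text):
--         return "end"
--     prefix = text[:char_index] if char_index > 0 else ""
--     line_num = prefix.count("\n") + 1
--     char_in_line = char_index - (prefix.rfind("\n") + 1)
--     return f"{line_num}.{char_in_line}"
-- ===== Notes on version B (the rewrite author's own statement) =====
-- stated objective: simpler
-- what changed: Replaces A's accumulating scan over text.split("\n") lines with direct arithmetic on the prefix text[:char_index]: count("\n") gives the line number and rfind("\n")+1 the line start; an explicit 'end' guard for char_index > len(text).
import Mathlib
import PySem

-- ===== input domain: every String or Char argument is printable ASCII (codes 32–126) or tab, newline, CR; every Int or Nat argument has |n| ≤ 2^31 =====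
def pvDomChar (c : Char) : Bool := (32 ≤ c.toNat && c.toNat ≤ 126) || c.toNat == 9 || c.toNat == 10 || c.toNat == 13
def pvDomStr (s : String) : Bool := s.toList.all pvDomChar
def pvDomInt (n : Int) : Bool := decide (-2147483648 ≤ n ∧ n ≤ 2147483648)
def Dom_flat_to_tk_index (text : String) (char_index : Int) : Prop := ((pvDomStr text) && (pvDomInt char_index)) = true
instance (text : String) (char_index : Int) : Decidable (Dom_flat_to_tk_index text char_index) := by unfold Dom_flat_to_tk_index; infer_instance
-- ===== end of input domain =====

-- B replaces A's accumulating scan over split("\n") lines by direct arithmetic on the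
-- prefix text[:char_index]: count("\n") gives the line, rfind("\n") the line start (simpler).

-- ===== PORT A =====
-- the for-loop over enumerate(text.split("\n"), start=1) with accumulator current_char_count
def flatA_go (ci : Int) : List String → Int → Int → String
  | [], _, _ => "end"
  | line :: rest, lineNum, cur =>
      let lineLength : Int := PySem.Str.len line + 1
      if cur + lineLength > ci then
        PySem.Int.toStr lineNum ++ "." ++ PySem.Int.toStr (ci - cur)
      else
        flatA_go ci rest (lineNum + 1) (cur + lineLength)

def flat_to_tk_index (text : String) (char_index : Int) : String :=
  flatA_go char_index ((PySem.Str.split? text "\n").getD [text]) 1 0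

-- ===== PORT B =====
def flat_to_tk_index_alt (text : String) (char_index : Int) : String :=
  if char_index > PySem.Str.len text then "end"
  else
    let pre := if 0 < char_index then PySem.Str.slice text none (some char_index) else ""
    let lineNum : Int := (PySem.Str.count pre "\n" : Int) + 1
    let charInLine : Int := char_index - (PySem.Str.rfind pre "\n" + 1)
    PySem.Int.toStr lineNum ++ "." ++ PySem.Int.toStr charInLine

-- ===== PRECONDITION & SPEC =====
def Spec_flat_to_tk_index (text : String) (char_index : Int) (out : String) : Prop := out = flat_to_tk_index_alt text char_index
instance (text : String) (char_index : Int) (out : String) : Decidable (Spec_flat_to_tk_index text char_index out) := by unfold Spec_flat_to_tk_index; infer_instance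

-- ===== CLAIM (what is proved, stated in full; the proofs are below) =====
def Claim_equal_flat_to_tk_index : Prop := ∀ (text : String) (char_index : Int), Dom_flat_to_tk_index text char_index → Spec_flat_to_tk_index text char_index (flat_to_tk_index text char_index)

-- ===== LEMMAS AND PROOFS =====

-- Python split("\n") as a plain structural recursion
def linesOf : List Char → List (List Char)
  | [] => [[]]
  | c :: t => if c = '\n' then [] :: linesOf t else List.modifyHead (c :: ·) (linesOf t)

-- index just after the last '\n' (0 if none) = rfind("\n") + 1
def lastNL : List Char → Int
  | [] => 0
  | c :: t => if lastNL t > 0 then 1 + lastNL t else if c = '\n' then 1 else 0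

theorem modifyHead_cons' {α : Type} (f : α → α) (a : α) (l : List α) :
    List.modifyHead f (a :: l) = f a :: l := rfl

theorem intercalate_cons' (a : List Char) (b : List (List Char)) (hb : b ≠ []) :
    List.intercalate ['\n'] (a :: b) = a ++ '\n' :: List.intercalate ['\n'] b := by
  cases b with
  | nil => simp at hb
  | cons x l => simp [List.intercalate]

theorem linesOf_ne_nil (cs : List Char) : linesOf cs ≠ [] := by
  induction cs with
  | nil => simp [linesOf]
  | cons c t ih =>
      simp only [linesOf]
      split
      · simp
      · cases h : linesOf t with
        | nil => exact absurd h ih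
        | cons a l => simp

theorem linesOf_no_nl (cs : List Char) : ∀ l ∈ linesOf cs, '\n' ∉ l := by
  induction cs with
  | nil => simp [linesOf]
  | cons c t ih =>
      simp only [linesOf]
      split
      · intro l hl
        rcases List.mem_cons.mp hl with h | h
        · simp [h]
        · exact ih l h
      · rename_i hc
        cases h : linesOf t with
        | nil => exact absurd h (linesOf_ne_nil t)
        | cons a l =>
            intro m hm
            rw [modifyHead_cons'] at hm
            rcases List.mem_cons.mp hm with hm | hm
            · subst hm
              intro hmem
              rcases List.mem_cons.mp hmem with h' | h'
              · exact hc h'.symm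
              · exact ih a (h ▸ List.mem_cons_self) h'
            · exact ih m (h ▸ List.mem_cons_of_mem a hm)

theorem intercalate_linesOf (cs : List Char) : List.intercalate ['\n'] (linesOf cs) = cs := by
  induction cs with
  | nil => simp [linesOf, List.intercalate]
  | cons c t ih =>
      simp only [linesOf]
      split
      · rename_i hc
        subst hc
        rw [intercalate_cons' [] (linesOf t) (linesOf_ne_nil t), ih]
        simp
      · rename_i hc
        cases h : linesOf t with
        | nil => exact absurd h (linesOf_ne_nil t)
        | cons a l =>
            rw [h] at ih
            rw [modifyHead_cons']
            cases l with
            | nil =>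
                simp [List.intercalate] at ih ⊢
                simp [ih]
            | cons b u =>
                rw [intercalate_cons' a (b :: u) (by simp)] at ih
                rw [intercalate_cons' (c :: a) (b :: u) (by simp)]
                simp [ih]

theorem splitOn_go_spec (l : List Char) : ∀ fuel, l.length ≤ fuel → ∀ cur acc,
    PySem.Chars.splitOn.go ['\n'] fuel l cur acc
      = acc.reverse ++ List.modifyHead (cur.reverse ++ ·) (linesOf l) := by
  induction l with
  | nil =>
      intro fuel _ cur acc
      cases fuel <;> simp [PySem.Chars.splitOn.go, linesOf]
  | cons c t ih =>
      intro fuel hf cur acc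
      cases fuel with
      | zero => simp at hf
      | succ f =>
          by_cases hc : c = '\n'
          · subst hc
            rw [show PySem.Chars.splitOn.go ['\n'] (f+1) ('\n'::t) cur acc
                  = PySem.Chars.splitOn.go ['\n'] f t [] (cur.reverse :: acc) by
                simp [PySem.Chars.splitOn.go, List.isPrefixOf]]
            rw [ih f (by simpa using hf) [] (cur.reverse :: acc)]
            simp only [linesOf]
            cases h : linesOf t with
            | nil => exact absurd h (linesOf_ne_nil t)
            | cons a l => simp
          · rw [show PySem.Chars.splitOn.go ['\n'] (f+1) (c::t) cur acc
                  = PySem.Chars.splitOn.go ['\n'] f t (c :: cur) acc by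
                simp [PySem.Chars.splitOn.go, List.isPrefixOf, Ne.symm hc]]
            rw [ih f (by simpa using hf) (c :: cur) acc]
            simp only [linesOf, if_neg hc]
            cases h : linesOf t with
            | nil => exact absurd h (linesOf_ne_nil t)
            | cons a l => simp

theorem splitOn_eq_linesOf (cs : List Char) : PySem.Chars.splitOn cs ['\n'] = linesOf cs := by
  rw [PySem.Chars.splitOn]
  rw [splitOn_go_spec cs (cs.length + 1) (by omega) [] []]
  cases h : linesOf cs with
  | nil => exact absurd h (linesOf_ne_nil cs)
  | cons a l => simp [modifyHead_cons']

theorem count_go_spec (l : List Char) : ∀ fuel, l.length ≤ fuel → ∀ acc,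
    PySem.Chars.count.go ['\n'] fuel l acc = acc + l.count '\n' := by
  induction l with
  | nil => intro fuel _ acc; cases fuel <;> simp [PySem.Chars.count.go]
  | cons c t ih =>
      intro fuel hf acc
      cases fuel with
      | zero => simp at hf
      | succ f =>
          by_cases hc : c = '\n'
          · subst hc
            rw [show PySem.Chars.count.go ['\n'] (f+1) ('\n'::t) acc
                  = PySem.Chars.count.go ['\n'] f t (acc + 1) by
                simp [PySem.Chars.count.go, List.isPrefixOf]]
            rw [ih f (by simpa using hf) (acc + 1)]
            simp
            omega
          · rw [show PySem.Chars.count.go ['\n'] (f+1) (c::t) acc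
                  = PySem.Chars.count.go ['\n'] f t acc by
                simp [PySem.Chars.count.go, List.isPrefixOf, Ne.symm hc]]
            rw [ih f (by simpa using hf) acc]
            simp [hc]

theorem countNL (cs : List Char) : PySem.Chars.count cs ['\n'] = cs.count '\n' := by
  rw [PySem.Chars.count]
  simp [count_go_spec cs cs.length le_rfl 0]

theorem lastNL_nonneg (cs : List Char) : 0 ≤ lastNL cs := by
  induction cs with
  | nil => simp [lastNL]
  | cons c t ih => simp only [lastNL]; split_ifs <;> omega

theorem lastNL_of_not_mem (cs : List Char) (h : '\n' ∉ cs) : lastNL cs = 0 := by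
  induction cs with
  | nil => simp [lastNL]
  | cons c t ih =>
      simp only [List.mem_cons, not_or] at h
      simp only [lastNL, ih h.2]
      simp [Ne.symm h.1]

theorem lastNL_append_nl (l p : List Char) : lastNL (l ++ '\n' :: p) = l.length + 1 + lastNL p := by
  induction l with
  | nil =>
      simp only [List.nil_append, lastNL, List.length_nil, Nat.cast_zero]
      have := lastNL_nonneg p
      split_ifs <;> omega
  | cons c t ih =>
      simp only [List.cons_append, lastNL, ih]
      rw [if_pos (by have := lastNL_nonneg p; omega)]
      simp only [List.length_cons]
      push_cast
      omega

theorem lastNL_snoc (xs : List Char) (c : Char) :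
    lastNL (xs ++ [c]) = if c = '\n' then (xs.length : Int) + 1 else lastNL xs := by
  by_cases hc : c = '\n'
  · subst hc
    rw [if_pos rfl]
    have := lastNL_append_nl xs []
    simpa [lastNL] using this
  · rw [if_neg hc]
    induction xs with
    | nil => simp [lastNL, hc]
    | cons d t ih =>
        simp only [List.cons_append, lastNL, ih]

theorem isPrefixOf_nl_drop (s : List Char) (k : Nat) :
    ['\n'].isPrefixOf (List.drop k s) = true ↔ s[k]? = some '\n' := by
  by_cases hk : k < s.length
  · rw [List.drop_eq_getElem_cons hk]
    simp only [List.isPrefixOf, Bool.and_eq_true, beq_iff_eq, List.getElem?_eq_getElem hk,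
      Option.some.injEq, and_true]
    exact eq_comm
  · rw [List.drop_eq_nil_of_le (by omega)]
    simp [List.isPrefixOf]
    intro h
    exact absurd (List.getElem?_eq_some_iff.mp h).1 hk

theorem rfind_go_spec (s : List Char) : ∀ j, j ≤ s.length →
    PySem.Chars.rfind.go s ['\n'] j = lastNL (List.take (j+1) s) - 1 := by
  intro j
  induction j with
  | zero =>
      intro _
      rw [show PySem.Chars.rfind.go s ['\n'] 0
            = if ['\n'].isPrefixOf s then (0:Int) else -1 from rfl]
      cases s with
      | nil => simp [List.isPrefixOf, lastNL]
      | cons c t =>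
          by_cases hc : c = '\n'
          · subst hc; simp [List.isPrefixOf, lastNL]
          · simp [List.isPrefixOf, Ne.symm hc, lastNL, hc]
  | succ j ih =>
      intro hj
      rw [PySem.Chars.rfind.go]
      rw [List.take_succ]
      by_cases hp : s[j+1]? = some '\n'
      · rw [if_pos ((isPrefixOf_nl_drop s (j+1)).mpr hp)]
        rw [hp]
        simp only [Option.toList_some]
        rw [lastNL_snoc _ _, if_pos rfl]
        have hlen : j + 1 < s.length := (List.getElem?_eq_some_iff.mp hp).1
        rw [List.length_take, Nat.min_eq_left (by omega : j+1 ≤ s.length)]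
        push_cast
        omega
      · rw [if_neg (by rw [isPrefixOf_nl_drop s (j+1)]; exact hp)]
        rw [ih (by omega)]
        cases h : s[j+1]? with
        | none => simp
        | some c =>
            have hc : c ≠ '\n' := by rintro rfl; exact hp h
            simp only [Option.toList_some]
            rw [lastNL_snoc _ _, if_neg hc]

theorem rfindNL (cs : List Char) : PySem.Chars.rfind cs ['\n'] = lastNL cs - 1 := by
  rw [PySem.Chars.rfind, rfind_go_spec cs cs.length le_rfl]
  rw [List.take_of_length_le (by omega)]

-- total length consumed by A's loop: sum of len(line)+1
def sumLens (ls : List String) : Int := ls.foldr (fun l a => PySem.Str.len l + 1 + a) 0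

theorem sumLens_cons (l : String) (t : List String) :
    sumLens (l :: t) = PySem.Str.len l + 1 + sumLens t := rfl

theorem sumLens_nonneg (ls : List String) : 0 ≤ sumLens ls := by
  induction ls with
  | nil => simp [sumLens]
  | cons l t ih =>
      rw [sumLens_cons]
      have : (0:Int) ≤ PySem.Str.len l := by rw [PySem.Str.len_eq]; positivity
      omega

theorem flatA_go_cons (i : Int) (l : String) (t : List String) (n c : Int) :
    flatA_go i (l :: t) n c
      = if c + (PySem.Str.len l + 1) > i then
          PySem.Int.toStr n ++ "." ++ PySem.Int.toStr (i - c)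
        else flatA_go i t (n + 1) (c + (PySem.Str.len l + 1)) := rfl

theorem goA_end (ls : List String) : ∀ (n c i : Int), c + sumLens ls ≤ i →
    flatA_go i ls n c = "end" := by
  induction ls with
  | nil => intro n c i _; simp [flatA_go]
  | cons l t ih =>
      intro n c i h
      rw [sumLens_cons] at h
      have ht := sumLens_nonneg t
      rw [flatA_go_cons, if_neg (by omega)]
      exact ih (n+1) (c + (PySem.Str.len l + 1)) i (by omega)

theorem sumLens_eq (ls : List String) (h : ls ≠ []) :
    sumLens ls = (List.intercalate ['\n'] (ls.map String.toList)).length + 1 := by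
  induction ls with
  | nil => exact absurd rfl h
  | cons l t ih =>
      cases t with
      | nil => simp [sumLens, List.intercalate, PySem.Str.len_eq]
      | cons m u =>
          have ht := ih (by simp)
          rw [sumLens_cons, ht]
          rw [show ((l :: m :: u).map String.toList)
                = l.toList :: ((m :: u).map String.toList) from rfl]
          rw [intercalate_cons' _ _ (by simp)]
          simp only [List.length_append, List.length_cons, PySem.Str.len_eq]
          push_cast
          omega

theorem goA_spec (ls : List String) (hne : ls ≠ []) (hnl : ∀ l ∈ ls, '\n' ∉ l.toList) :
    ∀ (n c : Int) (j : Nat), j ≤ (List.intercalate ['\n'] (ls.map String.toList)).length →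
    flatA_go (c + (j:Int)) ls n c
      = PySem.Int.toStr (((List.take j (List.intercalate ['\n'] (ls.map String.toList))).count '\n' : Int) + n)
        ++ "." ++ PySem.Int.toStr ((j : Int) - lastNL (List.take j (List.intercalate ['\n'] (ls.map String.toList)))) := by
  induction ls with
  | nil => exact absurd rfl hne
  | cons l t ih =>
      intro n c j hj
      rw [flatA_go_cons]
      by_cases hcase : j ≤ l.toList.length
      · rw [if_pos (by rw [PySem.Str.len_eq]; push_cast; omega)]
        have htake : List.take j (List.intercalate ['\n'] ((l :: t).map String.toList))
            = List.take j l.toList := by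
          cases t with
          | nil => simp [List.intercalate]
          | cons m u =>
              rw [show ((l :: m :: u).map String.toList)
                    = l.toList :: ((m :: u).map String.toList) from rfl]
              rw [intercalate_cons' _ _ (by simp)]
              exact List.take_append_of_le_length hcase
        have hmem : '\n' ∉ List.take j l.toList := fun hx =>
          hnl l List.mem_cons_self (List.mem_of_mem_take hx)
        rw [htake, List.count_eq_zero.mpr hmem, lastNL_of_not_mem _ hmem]
        rw [show (((0:Nat)):Int) + n = n by push_cast; ring,
          show c + (j:Int) - c = (j:Int) - 0 by ring]
      · -- j > len l: recurse into the remaining lines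
        push_neg at hcase
        cases t with
        | nil =>
            exfalso
            simp [List.intercalate] at hj
            have hb : l.toList.length = l.length := by simp
            omega
        | cons m u =>
            rw [if_neg (by rw [PySem.Str.len_eq]; push_cast; omega)]
            have hcs : List.intercalate ['\n'] ((l :: m :: u).map String.toList)
                = l.toList ++ '\n' :: List.intercalate ['\n'] ((m :: u).map String.toList) := by
              rw [show ((l :: m :: u).map String.toList)
                    = l.toList :: ((m :: u).map String.toList) from rfl]
              exact intercalate_cons' _ _ (by simp)
            set cs' := List.intercalate ['\n'] ((m :: u).map String.toList) with hcs'
            have hj' : j - l.toList.length - 1 ≤ cs'.length := by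
              rw [hcs] at hj
              simp only [List.length_append, List.length_cons] at hj
              have hb : l.toList.length = l.length := by simp
              omega
            have hrec := ih (by simp) (fun x hx => hnl x (List.mem_cons_of_mem l hx))
              (n + 1) (c + (PySem.Str.len l + 1)) (j - l.toList.length - 1) hj'
            rw [show c + (j:Int) = c + (PySem.Str.len l + 1) + ((j - l.toList.length - 1 : Nat) : Int) by
              rw [PySem.Str.len_eq]; push_cast; omega]
            rw [hrec, hcs]
            have hsplit : List.take j (l.toList ++ '\n' :: cs')
                = l.toList ++ '\n' :: List.take (j - l.toList.length - 1) cs' := by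
              rw [List.take_append]
              congr 1
              · exact List.take_of_length_le (by omega)
              · rw [show j - l.toList.length = (j - l.toList.length - 1) + 1 by omega]
                simp
            rw [hsplit]
            have hcnt : '\n' ∉ l.toList := hnl l List.mem_cons_self
            rw [show (l.toList ++ '\n' :: List.take (j - l.toList.length - 1) cs').count '\n'
                  = (List.take (j - l.toList.length - 1) cs').count '\n' + 1 by
              rw [List.count_append, List.count_cons]
              simp [List.count_eq_zero.mpr hcnt]]
            rw [lastNL_append_nl]
            rw [show (((List.take (j - l.toList.length - 1) cs').count '\n' + 1 : Nat) : Int) + n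
                  = (((List.take (j - l.toList.length - 1) cs').count '\n' : Nat) : Int) + (n + 1) by
                push_cast; ring]
            rw [show (j:Int) - ((l.toList.length : Int) + 1 + lastNL (List.take (j - l.toList.length - 1) cs'))
                  = ((j - l.toList.length - 1 : Nat) : Int) - lastNL (List.take (j - l.toList.length - 1) cs') by
                omega]

theorem split_lines (text : String) :
    (PySem.Str.split? text "\n").getD [text] = (linesOf text.toList).map String.ofList := by
  rw [PySem.Str.split?, PySem.Chars.split?]
  simp [splitOn_eq_linesOf]

-- ===== VERDICT (by name: the statement is the Claim_ definition above) =====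
theorem flat_to_tk_index_spec : Claim_equal_flat_to_tk_index := by
  intro text i _
  unfold Spec_flat_to_tk_index flat_to_tk_index flat_to_tk_index_alt
  rw [split_lines]
  set cs := text.toList with hcs
  have hlen : PySem.Str.len text = (cs.length : Int) := by rw [PySem.Str.len_eq]
  have hmap : ((linesOf cs).map String.ofList).map String.toList = linesOf cs := by
    simp [Function.comp_def]
  by_cases hbig : i > (cs.length : Int)
  · rw [if_pos (by rw [hlen]; exact hbig)]
    apply goA_end
    rw [sumLens_eq _ (by simp [linesOf_ne_nil]), hmap, intercalate_linesOf]
    omega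
  · rw [if_neg (by rw [hlen]; exact hbig)]
    push_neg at hbig
    by_cases hpos : 0 < i
    · -- 0 < i ≤ len
      have hpref : (PySem.Str.slice text none (some i)).toList = List.take i.toNat cs := by
        rw [PySem.Str.toList_slice, PySem.Chars.slice_eq_listSlice,
          PySem.List.slice_to text.toList (le_of_lt hpos)]
      have hspec := goA_spec ((linesOf cs).map String.ofList) (by simp [linesOf_ne_nil])
        (by intro l hl
            simp only [List.mem_map] at hl
            obtain ⟨x, hx, rfl⟩ := hl
            simpa using linesOf_no_nl cs x hx)
        1 0 i.toNat (by rw [hmap, intercalate_linesOf]; omega)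
      rw [show (0:Int) + ((i.toNat : Nat) : Int) = i by omega] at hspec
      rw [hmap, intercalate_linesOf] at hspec
      rw [hspec]
      simp only [if_pos hpos]
      rw [PySem.Str.count_eq, PySem.Str.rfind_eq, hpref]
      rw [show ("\n" : String).toList = ['\n'] from rfl]
      rw [countNL, rfindNL]
      rw [show i - (lastNL (List.take i.toNat cs) - 1 + 1) = ((i.toNat : Nat) : Int) - lastNL (List.take i.toNat cs) by omega]
    · -- i ≤ 0
      push_neg at hpos
      obtain ⟨a, t, hsplit⟩ : ∃ a t, (linesOf cs).map String.ofList = a :: t := by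
        cases h : linesOf cs with
        | nil => exact absurd h (linesOf_ne_nil cs)
        | cons x l => exact ⟨String.ofList x, l.map String.ofList, by simp [h]⟩
      rw [hsplit, flatA_go_cons]
      have hla : (0:Int) ≤ PySem.Str.len a := by rw [PySem.Str.len_eq]; positivity
      rw [if_pos (by omega)]
      simp only [if_neg (by omega : ¬ 0 < i)]
      rw [PySem.Str.count_eq, PySem.Str.rfind_eq]
      rw [show ("" : String).toList = [] from rfl, show ("\n" : String).toList = ['\n'] from rfl]
      rw [countNL, rfindNL]
      simp [lastNL]
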